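-- pv_equiv track=rewrite | github.com/soloplayer500/YNAI5-Phase1 | projects/social-media-automation/pipeline/trend.py | _hook
-- ===== SOURCE A (Python) =====
-- def _hook(title: str, desc: str) -> str:
--     text = (title + desc).lower()
--     if any(w in text for w in ["replac", "partner", "beats", "surpass"]):
--         return f"Nobody expected this: {title}"
--     if any(w in text for w in ["billion", "trillion"]):
--         return f"The money behind this is wild: {title}"
--     if any(w in text for w in ["ban", "expos", "leak"]):
--         return f"They tried to hide this: {title}"
--     return f"Wait— {title}"
-- ===== SOURCE B (Python) =====
-- _KW = {"replac": 0, "partner": 0, "beats": 0, "surpass": 0,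
--        "billion": 1, "trillion": 1,
--        "ban": 2, "expos": 2, "leak": 2}
-- _TPL = ["Nobody expected this: ", "The money behind this is wild: ",
--         "They tried to hide this: ", "Wait\u2014 "]
--
-- def _hook(title: str, desc: str) -> str:
--     text = (title + desc).lower()
--     tier = min((t for w, t in _KW.items() if w in text), default=3)
--     return _TPL[tier] + title
-- ===== Notes on version B (the rewrite author's own statement) =====
-- stated objective: alternative
-- what changed: Replaces A's short-circuiting four-branch if-cascade by a flat keyword->tier map: B scans all nine keywords once, takes the minimum tier among those present (default 3), and indexes a template table by that tier.
import Mathlib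
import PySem

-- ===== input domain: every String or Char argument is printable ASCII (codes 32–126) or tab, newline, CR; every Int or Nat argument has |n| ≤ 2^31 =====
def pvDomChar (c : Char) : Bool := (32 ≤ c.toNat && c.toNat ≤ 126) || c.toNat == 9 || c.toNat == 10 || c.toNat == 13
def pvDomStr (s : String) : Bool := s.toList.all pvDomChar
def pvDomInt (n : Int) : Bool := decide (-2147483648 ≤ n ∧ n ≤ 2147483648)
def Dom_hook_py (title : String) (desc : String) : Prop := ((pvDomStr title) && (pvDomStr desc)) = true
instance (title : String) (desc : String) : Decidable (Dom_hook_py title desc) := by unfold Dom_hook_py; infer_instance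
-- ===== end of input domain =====

-- B replaces A's short-circuiting if-cascade by a min-tier aggregation over a flat
-- keyword->tier map, indexing a template table by the minimum matched tier; objective: alternative.

-- Python string concatenation (kernel-transparent, exact on code points)
def pyCat (a b : String) : String := String.ofList (a.toList ++ b.toList)

-- ===== PORT A =====
def hook_py (title : String) (desc : String) : String :=
  let text := PySem.Str.lower (pyCat title desc)
  if ["replac", "partner", "beats", "surpass"].any (fun w => PySem.Str.isIn w text) then
    pyCat "Nobody expected this: " title
  else if ["billion", "trillion"].any (fun w => PySem.Str.isIn w text) then
    pyCat "The money behind this is wild: " title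
  else if ["ban", "expos", "leak"].any (fun w => PySem.Str.isIn w text) then
    pyCat "They tried to hide this: " title
  else
    pyCat "Wait— " title

-- ===== PORT B =====
def hookKw : List (String × Nat) :=
  [("replac", 0), ("partner", 0), ("beats", 0), ("surpass", 0),
   ("billion", 1), ("trillion", 1),
   ("ban", 2), ("expos", 2), ("leak", 2)]

def hookTpl : List String :=
  ["Nobody expected this: ", "The money behind this is wild: ",
   "They tried to hide this: ", "Wait— "]

def hook_py_alt (title : String) (desc : String) : String :=
  let text := PySem.Str.lower (pyCat title desc)
  -- tier = min((t for w, t in _KW.items() if w in text), default=3)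
  let tier := (PySem.List.min?
      ((hookKw.filter (fun p => PySem.Str.isIn p.1 text)).map Prod.snd)
      (fun t => t)).getD 3
  -- _TPL[tier]: tier ≤ 3 always, so the index is in range and the getD default is never used
  pyCat ((PySem.List.pyGet? hookTpl (Int.ofNat tier)).getD "") title

-- ===== PRECONDITION & SPEC =====
def Spec_hook_py (title : String) (desc : String) (out : String) : Prop := out = hook_py_alt title desc
instance (title : String) (desc : String) (out : String) : Decidable (Spec_hook_py title desc out) := by unfold Spec_hook_py; infer_instance

-- ===== CLAIM =====
def Claim_equal_hook_py : Prop := ∀ (title : String) (desc : String), Dom_hook_py title desc → Spec_hook_py title desc (hook_py title desc)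

-- ===== LEMMAS AND PROOFS =====

-- The filtered keyword scan is unchanged when each keyword test is precomputed into a Bool.
theorem hook_filter_map_eq (text : String) (l : List (String × Nat)) :
    ((l.filter (fun p => PySem.Str.isIn p.1 text)).map Prod.snd)
      = (((l.map (fun p => (PySem.Str.isIn p.1 text, p.2))).filter (fun q => q.1)).map Prod.snd) := by
  induction l with
  | nil => rfl
  | cons a t ih =>
      simp only [List.map_cons, List.filter_cons]
      by_cases h : PySem.Str.isIn a.1 text = true
      · simp only [if_pos h, List.map_cons, ih]
      · simp only [if_neg h, ih]

-- Minimum matched tier over the nine-keyword table, as a function of the nine Bool tests.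
theorem hook_tier_bool (b1 b2 b3 b4 b5 b6 b7 b8 b9 : Bool) :
    (PySem.List.min?
        ((([(b1, 0), (b2, 0), (b3, 0), (b4, 0), (b5, 1), (b6, 1), (b7, 2), (b8, 2), (b9, 2)] :
            List (Bool × Nat)).filter (fun q => q.1)).map Prod.snd)
        (fun t => t)).getD 3 =
      (if (b1 || (b2 || (b3 || (b4 || false)))) = true then 0
       else if (b5 || (b6 || false)) = true then 1
       else if (b7 || (b8 || (b9 || false))) = true then 2 else 3) := by
  revert b1 b2 b3 b4 b5 b6 b7 b8 b9; decide

-- ===== VERDICT =====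
set_option maxHeartbeats 1000000 in
theorem hook_py_spec : Claim_equal_hook_py := by
  intro title desc _
  unfold Spec_hook_py hook_py hook_py_alt hookKw hookTpl
  simp only [List.any_cons, List.any_nil]
  rw [hook_filter_map_eq]
  simp only [List.map_cons, List.map_nil]
  rw [hook_tier_bool]
  by_cases h1 : (PySem.Str.isIn "replac" (PySem.Str.lower (pyCat title desc)) ||
      (PySem.Str.isIn "partner" (PySem.Str.lower (pyCat title desc)) ||
        (PySem.Str.isIn "beats" (PySem.Str.lower (pyCat title desc)) ||
          (PySem.Str.isIn "surpass" (PySem.Str.lower (pyCat title desc)) || false)))) = true <;>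
  by_cases h2 : (PySem.Str.isIn "billion" (PySem.Str.lower (pyCat title desc)) ||
      (PySem.Str.isIn "trillion" (PySem.Str.lower (pyCat title desc)) || false)) = true <;>
  by_cases h3 : (PySem.Str.isIn "ban" (PySem.Str.lower (pyCat title desc)) ||
      (PySem.Str.isIn "expos" (PySem.Str.lower (pyCat title desc)) ||
        (PySem.Str.isIn "leak" (PySem.Str.lower (pyCat title desc)) || false))) = true <;>
  (try simp only [Bool.not_eq_true] at h1) <;>
  (try simp only [Bool.not_eq_true] at h2) <;>
  (try simp only [Bool.not_eq_true] at h3) <;>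
  simp only [h1, h2, h3] <;> rfl
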